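-- pv_equiv track=rewrite | github.com/ziyerr/legion-0 | hermes-plugin/design_tech_plan.py | _guess_title_from_markdown
-- ===== SOURCE A (Python) =====
-- def _guess_title_from_markdown(md: str) -> str:
--     """取 markdown 第一个 h1，其次第一行非空。"""
--     for line in md.splitlines():
--         s = line.strip()
--         if s.startswith("# "):
--             return s.lstrip("# ").strip() or "PRD"
--     for line in md.splitlines():
--         s = line.strip()
--         if s:
--             return s[:80]
--     return "PRD"
-- ===== SOURCE B (Python) =====
-- def _guess_title_from_markdown(md: str) -> str:
--     """Single pass: return first h1 immediately; remember first nonempty line as fallback."""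
--     first_nonempty = None
--     for line in md.splitlines():
--         s = line.strip()
--         if s.startswith("# "):
--             return s.lstrip("# ").strip() or "PRD"
--         if s and first_nonempty is None:
--             first_nonempty = s
--     return first_nonempty[:80] if first_nonempty is not None else "PRD"
-- ===== Notes on version B (the rewrite author's own statement) =====
-- stated objective: alternative
-- what changed: Merges A's two separate scans of md.splitlines() into one traversal that remembers the first nonempty line while looking for the first h1.
import Mathlib
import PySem

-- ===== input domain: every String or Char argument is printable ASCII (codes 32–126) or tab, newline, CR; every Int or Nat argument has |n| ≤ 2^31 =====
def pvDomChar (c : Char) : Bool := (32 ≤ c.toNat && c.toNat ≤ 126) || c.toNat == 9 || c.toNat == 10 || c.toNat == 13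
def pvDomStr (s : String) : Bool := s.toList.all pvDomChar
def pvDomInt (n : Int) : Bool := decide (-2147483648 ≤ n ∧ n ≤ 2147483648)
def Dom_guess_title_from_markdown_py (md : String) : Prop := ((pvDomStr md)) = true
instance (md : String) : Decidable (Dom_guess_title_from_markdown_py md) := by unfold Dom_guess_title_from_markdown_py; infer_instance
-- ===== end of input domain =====

-- B merges A's two scans of md.splitlines() into one pass that remembers the first nonempty line (objective: alternative single-pass decomposition).

-- s.lstrip("# ") — hand port (PySem has no lstrip-with-chars): drop leading '#' and ' '; exact Python semantics.
def pyLstripHashSpace (s : String) : String :=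
  String.ofList (s.toList.dropWhile (fun c => c == '#' || c == ' '))

-- ===== PORT A =====
-- first loop of A: return the h1 title if some line is an h1
def guessTitleLoop1 : List String → Option String
  | [] => none
  | line :: rest =>
    let s := PySem.Str.strip line
    if PySem.Str.startswith s "# " then
      let t := PySem.Str.strip (pyLstripHashSpace s)
      some (if t = "" then "PRD" else t)
    else guessTitleLoop1 rest

-- second loop of A: first nonempty stripped line, truncated to 80
def guessTitleLoop2 : List String → Option String
  | [] => none
  | line :: rest =>
    let s := PySem.Str.strip line
    if s ≠ "" then some (PySem.Str.slice s none (some 80))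
    else guessTitleLoop2 rest

def guess_title_from_markdown_py (md : String) : String :=
  let lines := PySem.Str.splitlines md
  match guessTitleLoop1 lines with
  | some r => r
  | none =>
    match guessTitleLoop2 lines with
    | some r => r
    | none => "PRD"

-- ===== PORT B =====
-- single pass carrying first_nonempty (None at start)
def guessTitleGo : List String → Option String → String
  | [], acc =>
    match acc with
    | some f => PySem.Str.slice f none (some 80)
    | none => "PRD"
  | line :: rest, acc =>
    let s := PySem.Str.strip line
    if PySem.Str.startswith s "# " then
      let t := PySem.Str.strip (pyLstripHashSpace s)
      if t = "" then "PRD" else t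
    else if s ≠ "" ∧ acc = none then guessTitleGo rest (some s)
    else guessTitleGo rest acc

def guess_title_from_markdown_py_alt (md : String) : String :=
  guessTitleGo (PySem.Str.splitlines md) none

-- ===== PRECONDITION & SPEC =====
def Spec_guess_title_from_markdown_py (md : String) (out : String) : Prop := out = guess_title_from_markdown_py_alt md
instance (md : String) (out : String) : Decidable (Spec_guess_title_from_markdown_py md out) := by unfold Spec_guess_title_from_markdown_py; infer_instance

-- ===== CLAIM (what is proved, stated in full; the proofs are below) =====
def Claim_equal_guess_title_from_markdown_py : Prop := ∀ (md : String), Dom_guess_title_from_markdown_py md → Spec_guess_title_from_markdown_py md (guess_title_from_markdown_py md)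

-- ===== LEMMAS AND PROOFS =====

-- Invariant of the single pass: it equals A's two-loop structure with acc as the pending fallback.
theorem guessTitleGo_eq (lines : List String) :
    ∀ acc : Option String,
      guessTitleGo lines acc =
        match guessTitleLoop1 lines with
        | some r => r
        | none =>
          match acc with
          | some f => PySem.Str.slice f none (some 80)
          | none =>
            match guessTitleLoop2 lines with
            | some r => r
            | none => "PRD" := by
  induction lines with
  | nil => intro acc; cases acc <;> rfl
  | cons line rest ih =>
    intro acc
    simp only [guessTitleGo, guessTitleLoop1, guessTitleLoop2]
    by_cases h1 : PySem.Chars.startswith (PySem.Chars.strip line.toList) ['#', ' '] = true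
    · simp [h1]
    · simp only [PySem.Str.startswith, if_false, Bool.false_eq_true]
      by_cases hs : PySem.Str.strip line = ""
      · simp [hs, ih, (by decide : PySem.Chars.startswith [] ['#', ' '] = false)]
      · cases acc with
        | none =>
          simp [h1, hs, ih]
        | some f =>
          simp [h1, hs, ih]

-- ===== VERDICT (by name: the statement is the Claim_ definition above) =====
theorem guess_title_from_markdown_py_spec : Claim_equal_guess_title_from_markdown_py := by
  intro md _
  unfold Spec_guess_title_from_markdown_py guess_title_from_markdown_py guess_title_from_markdown_py_alt
  rw [guessTitleGo_eq]
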